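-- pv_equiv track=rewrite | github.com/JoelRamirez2016/holbertonschool-higher_level_programming | 0x07-python-test_driven_development/5-text_indentation.py | spaces_bt
-- ===== SOURCE A (Python) =====
-- def spaces_bt(t):
--     """Return a next "\n" coincident in string of spaces
--     Args:
--         t (str): string with spaces
--     """
--     cond = []
--     for c in t:
--         if c == " ":
--             cond.append(True)
--         elif c == "\n":
--             cond.append(True)
--             break
--         else:
--             cond.append(False)
--             break
--     return cond
-- ===== SOURCE B (Python) =====
-- def spaces_bt(t):
--     """Leading-space booleans: True per leading space, then one entry for
--     the first non-space char (True iff it is a newline)."""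
--     n = len(t) - len(t.lstrip(' '))
--     cond = [True] * n
--     if n < len(t):
--         cond.append(t[n] == '\n')
--     return cond
-- ===== Notes on version B (the rewrite author's own statement) =====
-- stated objective: simpler
-- what changed: Replaces the explicit character loop with three branches by a closed-form decomposition: count leading spaces via lstrip, build [True]*n, and append one boolean for the first non-space character.
import Mathlib
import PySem

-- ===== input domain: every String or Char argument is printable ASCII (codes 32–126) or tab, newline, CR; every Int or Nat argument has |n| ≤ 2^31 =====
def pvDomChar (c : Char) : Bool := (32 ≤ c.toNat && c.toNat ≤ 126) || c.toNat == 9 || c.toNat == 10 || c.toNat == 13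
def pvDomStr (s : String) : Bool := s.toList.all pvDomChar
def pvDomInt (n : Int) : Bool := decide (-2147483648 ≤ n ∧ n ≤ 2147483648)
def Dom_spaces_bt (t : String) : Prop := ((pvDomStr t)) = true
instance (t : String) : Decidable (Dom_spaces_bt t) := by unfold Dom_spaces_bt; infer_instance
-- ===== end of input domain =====

-- B replaces A's three-branch character loop by a closed form: count leading spaces, [True]*n, plus one boolean for the first non-space char (objective: simpler).

-- ===== PORT A =====
-- the for/elif/break loop of A: stop after the first non-space character
def spaces_bt_goA : List Char → List Bool
  | [] => []
  | c :: rest =>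
    if c = ' ' then true :: spaces_bt_goA rest
    else if c = '\n' then [true]
    else [false]

def spaces_bt (t : String) : List Bool := spaces_bt_goA t.toList

-- ===== PORT B =====
def spaces_bt_alt (t : String) : List Bool :=
  -- n = len(t) - len(t.lstrip(' ')) : lstrip(' ') drops exactly the leading spaces (exact hand port)
  let n := t.toList.length - (t.toList.dropWhile (· == ' ')).length
  let cond := List.replicate n true
  if n < t.toList.length then cond ++ [decide (t.toList.getD n 'a' = '\n')] else cond

-- ===== PRECONDITION & SPEC =====
def Spec_spaces_bt (t : String) (out : List Bool) : Prop := out = spaces_bt_alt t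
instance (t : String) (out : List Bool) : Decidable (Spec_spaces_bt t out) := by unfold Spec_spaces_bt; infer_instance

-- ===== CLAIM (what is proved, stated in full; the proofs are below) =====
def Claim_equal_spaces_bt : Prop := ∀ (t : String), Dom_spaces_bt t → Spec_spaces_bt t (spaces_bt t)

-- ===== LEMMAS AND PROOFS =====

theorem spaces_bt_list_eq (l : List Char) :
    spaces_bt_goA l =
      (let n := l.length - (l.dropWhile (· == ' ')).length
       let cond := List.replicate n true
       if n < l.length then cond ++ [decide (l.getD n 'a' = '\n')] else cond) := by
  induction l with
  | nil => simp [spaces_bt_goA]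
  | cons c rest ih =>
    by_cases hc : c = ' '
    · subst hc
      have hle : (rest.dropWhile (· == ' ')).length ≤ rest.length :=
        List.length_dropWhile_le _ _
      have hgo : spaces_bt_goA (' ' :: rest) = true :: spaces_bt_goA rest := by
        simp [spaces_bt_goA]
      have hd : ((' ' :: rest).dropWhile (· == ' ')) = rest.dropWhile (· == ' ') := by
        simp [List.dropWhile]
      rw [hgo, ih]
      show _ = if (' ' :: rest).length - ((' ' :: rest).dropWhile (· == ' ')).length
                  < (' ' :: rest).length
               then List.replicate ((' ' :: rest).length - ((' ' :: rest).dropWhile (· == ' ')).length) true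
                    ++ [decide ((' ' :: rest).getD ((' ' :: rest).length - ((' ' :: rest).dropWhile (· == ' ')).length) 'a' = '\n')]
               else List.replicate ((' ' :: rest).length - ((' ' :: rest).dropWhile (· == ' ')).length) true
      rw [hd, List.length_cons]
      have hlen : rest.length + 1 - (rest.dropWhile (· == ' ')).length
          = (rest.length - (rest.dropWhile (· == ' ')).length) + 1 := by omega
      rw [hlen]
      set n := rest.length - (rest.dropWhile (· == ' ')).length with hn
      by_cases hlt : n < rest.length
      · rw [if_pos hlt, if_pos (by omega)]
        rw [List.replicate_succ, List.getD_cons_succ]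
        rfl
      · rw [if_neg hlt, if_neg (by omega)]
        rw [List.replicate_succ]
    · have hdw : (c :: rest).dropWhile (· == ' ') = c :: rest := by
        rw [List.dropWhile_cons_of_neg]; simp [hc]
      show _ = if (c :: rest).length - ((c :: rest).dropWhile (· == ' ')).length
                  < (c :: rest).length
               then List.replicate ((c :: rest).length - ((c :: rest).dropWhile (· == ' ')).length) true
                    ++ [decide ((c :: rest).getD ((c :: rest).length - ((c :: rest).dropWhile (· == ' ')).length) 'a' = '\n')]
               else List.replicate ((c :: rest).length - ((c :: rest).dropWhile (· == ' ')).length) true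
      rw [hdw, Nat.sub_self, if_pos (by simp)]
      by_cases hnl : c = '\n'
      · simp [spaces_bt_goA, hnl, List.getD]
      · simp [spaces_bt_goA, hc, hnl, List.getD]

-- ===== VERDICT (by name: the statement is the Claim_ definition above) =====
theorem spaces_bt_spec : Claim_equal_spaces_bt := by
  intro t _
  unfold Spec_spaces_bt spaces_bt spaces_bt_alt
  exact spaces_bt_list_eq t.toList
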